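-- pv_equiv track=rewrite | github.com/rugkfl/study_pythons | docs/coding_test_programmers/120813.py | solution
-- ===== SOURCE A (Python) =====
-- def solution(n):
--     num = 0
--     num_list = []
--     result_list = []
--     for i in range(n) :
--         num += 1
--         num_list.append(num)
--     for i in range(len(num_list)) :
--         if num_list[i] % 2 != 0 :
--             result_list.append(num_list[i])
--     return result_list
-- ===== SOURCE B (Python) =====
-- def solution(n):
--     return list(range(1, n + 1, 2))
-- ===== Notes on version B (the rewrite author's own statement) =====
-- stated objective: simpler
-- what changed: Replaces the two-pass build-all-then-filter loops with directly generating the odd numbers in one stride-2 range; no intermediate list of all numbers and no modulo filter branch.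
import Mathlib
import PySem

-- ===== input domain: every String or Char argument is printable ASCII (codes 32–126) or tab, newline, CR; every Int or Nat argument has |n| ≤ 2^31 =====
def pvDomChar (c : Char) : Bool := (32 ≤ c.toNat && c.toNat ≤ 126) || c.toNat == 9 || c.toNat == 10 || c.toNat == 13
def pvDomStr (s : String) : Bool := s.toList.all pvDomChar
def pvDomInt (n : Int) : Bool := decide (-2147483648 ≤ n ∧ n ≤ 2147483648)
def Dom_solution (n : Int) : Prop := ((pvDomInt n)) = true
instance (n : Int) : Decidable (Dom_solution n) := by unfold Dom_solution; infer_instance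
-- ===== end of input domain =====

-- B generates the odd numbers directly with a stride-2 range instead of A's two passes (build 1..n, then filter by modulo).


-- ===== PORT A =====
def solution (n : Int) : List Int :=
  -- num = 0; num_list = []; for i in range(n): num += 1; num_list.append(num)
  let st := (PySem.List.pyRange 0 n 1).foldl
      (fun (st : Int × List Int) _ => (st.1 + 1, st.2 ++ [st.1 + 1])) (0, [])
  let num_list := st.2
  -- result_list = []; for i in range(len(num_list)): if num_list[i] % 2 != 0: result_list.append(num_list[i])
  (PySem.List.pyRange 0 (PySem.List.len num_list) 1).foldl
    (fun acc i =>
      if PySem.Int.mod (PySem.List.pyGetD num_list i 0) 2 ≠ 0 then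
        acc ++ [PySem.List.pyGetD num_list i 0]
      else acc) []

-- ===== PORT B =====
def solution_alt (n : Int) : List Int :=
  PySem.List.pyRange 1 (n + 1) 2

-- ===== PRECONDITION & SPEC =====
def Spec_solution (n : Int) (out : List Int) : Prop := out = solution_alt n
instance (n : Int) (out : List Int) : Decidable (Spec_solution n out) := by unfold Spec_solution; infer_instance

-- ===== CLAIM (what is proved, stated in full; the proofs are below) =====
def Claim_equal_solution : Prop := ∀ (n : Int), Dom_solution n → Spec_solution n (solution n)

-- ===== LEMMAS AND PROOFS =====

-- A's first loop: starting from counter a and accumulator xs, it appends a+1, a+2, …, a+len(l)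
theorem pv_fold1 {α : Type} (l : List α) (a : Int) (xs : List Int) :
    l.foldl (fun (st : Int × List Int) _ => (st.1 + 1, st.2 ++ [st.1 + 1])) (a, xs)
      = (a + l.length, xs ++ PySem.List.pyRange (a + 1) (a + l.length + 1) 1) := by
  induction l generalizing a xs with
  | nil => simp [PySem.List.pyRange_one_eq_nil]
  | cons x t ih =>
      rw [List.foldl_cons, ih]
      refine Prod.ext (by simp only [List.length_cons]; push_cast; ring) ?_
      simp only [List.length_cons]
      rw [show ((t.length + 1 : Nat) : Int) = (t.length : Int) + 1 from by push_cast; ring]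
      rw [PySem.List.pyRange_one_cons (show (a + 1 : Int) < a + ((t.length : Int) + 1) + 1 from by omega)]
      rw [show a + ((t.length : Int) + 1) + 1 = a + 1 + (t.length : Int) + 1 from by ring]
      simp

-- B's stride-2 range in closed form
theorem pv_c (b : Nat) : PySem.List.pyRange 1 ((b : Int) + 1) 2
    = (List.range ((b + 1) / 2)).map (fun k : Nat => (1 : Int) + 2 * k) := by
  rw [PySem.List.pyRange_of_pos 1 ((b : Int) + 1) (by norm_num)]
  congr 1
  rcases Nat.eq_zero_or_pos b with h | h
  · subst h; norm_num
  · rw [if_pos (by omega)]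
    rw [show ((b : Int) + 1 - 1 + 2 - 1) = (((b + 1 : Nat) : Int)) from by push_cast; ring]
    norm_cast

-- filtering the odd elements out of [1, …, m] leaves exactly the stride-2 list
theorem pv_odds' (m : Nat) :
    ((List.range m).map (fun k : Nat => (1 : Int) + k)).filter
        (fun x => decide (PySem.Int.mod x 2 ≠ 0))
      = (List.range ((m + 1) / 2)).map (fun k : Nat => (1 : Int) + 2 * k) := by
  induction m with
  | zero => simp
  | succ m ih =>
      rw [List.range_succ, List.map_append, List.filter_append, ih]
      simp only [List.map_cons, List.map_nil, List.filter_cons, List.filter_nil]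
      rw [PySem.Int.mod_eq_emod_of_pos (by norm_num : (0:Int) < 2)]
      rcases Nat.even_or_odd m with he | ho
      · obtain ⟨t, ht⟩ := he
        rw [if_pos (by subst ht; simp; omega)]
        have hcnt : (m + 1 + 1) / 2 = (m + 1) / 2 + 1 := by omega
        rw [hcnt, List.range_succ, List.map_append]
        congr 2
        push_cast
        omega
      · obtain ⟨t, ht⟩ := ho
        rw [if_neg (by subst ht; simp; omega)]
        have hcnt : (m + 1 + 1) / 2 = (m + 1) / 2 := by omega
        rw [hcnt, List.append_nil]

-- ===== VERDICT (by name: the statement is the Claim_ definition above) =====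
theorem solution_spec : Claim_equal_solution := by
  intro n _
  unfold Spec_solution solution solution_alt
  simp only
  rw [pv_fold1]
  simp only [List.nil_append, PySem.List.length_pyRange_one, Int.sub_zero, zero_add]
  rw [PySem.List.foldl_pyRange_pyGetD _ 0
        (fun acc v => if PySem.Int.mod v 2 ≠ 0 then acc ++ [v] else acc) [] (le_refl 0)]
  simp only [Int.toNat_zero, List.drop_zero]
  rw [PySem.List.foldl_append_ite_eq_filter]
  simp only [List.nil_append]
  rw [PySem.List.pyRange_one 1]
  rw [show ((n.toNat : Int) + 1 - 1).toNat = n.toNat from by omega]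
  rw [pv_odds', ← pv_c]
  rcases le_or_gt 0 n with h | h
  · rw [show ((n.toNat : Int)) = n from by omega]
  · rw [PySem.List.pyRange_of_pos 1 _ (by norm_num : (0:Int) < 2),
        PySem.List.pyRange_of_pos 1 _ (by norm_num : (0:Int) < 2),
        if_neg (by omega), if_neg (by omega)]
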